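-- pv_equiv track=rewrite | github.com/urciuolim/NLP-Term-Project | Part3/parser.py | remove_punc
-- ===== SOURCE A (Python) =====
-- def remove_punc(word):
--     c = 0
--     while True:
--         if c >= len(word) or word[c] in [" ", ",", ".", "?", "!"]:
--             break
--         elif c < len(word)-1 and word[c:c+2] == "\'s":
--             break
--         else:
--             c += 1
--     return word[0:c]
-- ===== SOURCE B (Python) =====
-- def remove_punc(word):
--     # min of whole-string searches for each delimiter, instead of a char-by-char scan
--     idx = len(word)
--     for d in (" ", ",", ".", "?", "!", "'s"):
--         p = word.find(d)
--         if p != -1 and p < idx: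
--             idx = p
--     return word[:idx]
-- ===== Notes on version B (the rewrite author's own statement) =====
-- stated objective: faster
-- what changed: Replaces the incremental char-by-char while-loop scan with one whole-string find() per delimiter (including "'s") combined by a running minimum, then a single slice; the per-character work moves from interpreted Python into C-level str.find.
import Mathlib
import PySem

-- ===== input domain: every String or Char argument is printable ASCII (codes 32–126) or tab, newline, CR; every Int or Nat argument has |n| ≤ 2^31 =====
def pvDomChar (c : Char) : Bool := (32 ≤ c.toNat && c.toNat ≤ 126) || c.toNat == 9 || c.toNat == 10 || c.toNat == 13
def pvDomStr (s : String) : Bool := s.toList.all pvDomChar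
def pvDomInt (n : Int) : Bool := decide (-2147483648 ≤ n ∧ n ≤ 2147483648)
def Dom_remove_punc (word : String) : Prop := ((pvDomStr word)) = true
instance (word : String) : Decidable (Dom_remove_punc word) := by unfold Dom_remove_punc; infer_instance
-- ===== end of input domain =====

-- B replaces A's char-by-char scan with one whole-string find() per delimiter combined by a running minimum (measured faster at large sizes: the scan moves into str.find).

-- ===== PORT A =====
-- A's while loop advances an index c until word[c] is a delimiter or word[c:c+2] == "'s";
-- ported as the obvious structural recursion over the remaining characters, returning c.
-- ('c < len(word)-1 and word[c:c+2] == "\'s"' holds exactly when the current char is '\''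
--  and a next char exists and is 's'.)
def removePuncScan : List Char → Nat
  | [] => 0
  | a :: rest =>
    if a == ' ' || a == ',' || a == '.' || a == '?' || a == '!' then 0
    else if (match rest with | b :: _ => a == '\'' && b == 's' | [] => false) then 0
    else removePuncScan rest + 1

def remove_punc (word : String) : String :=
  -- word[0:c]
  String.ofList (PySem.List.slice word.toList (some 0) (some ((removePuncScan word.toList : Int))))

-- ===== PORT B =====
def removePuncDelims : List (List Char) := [[' '], [','], ['.'], ['?'], ['!'], ['\'', 's']]

-- the running minimum: idx starts at len(word); each find() result replaces it when non-negative and smaller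
def removePuncIdx (cs : List Char) : Int :=
  removePuncDelims.foldl
    (fun idx d =>
      let p := PySem.Chars.find cs d
      if p ≠ -1 ∧ p < idx then p else idx)
    (cs.length : Int)

def remove_punc_alt (word : String) : String :=
  String.ofList (PySem.List.slice word.toList none (some (removePuncIdx word.toList)))   -- word[:idx]

-- ===== PRECONDITION & SPEC =====
def Spec_remove_punc (word : String) (out : String) : Prop := out = remove_punc_alt word
instance (word : String) (out : String) : Decidable (Spec_remove_punc word out) := by unfold Spec_remove_punc; infer_instance

-- ===== CLAIM (what is proved, stated in full; the proofs are below) =====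
def Claim_equal_remove_punc : Prop := ∀ (word : String), Dom_remove_punc word → Spec_remove_punc word (remove_punc word)

-- ===== LEMMAS AND PROOFS =====

-- The scan index never exceeds the length.
lemma scan_le (cs : List Char) : removePuncScan cs ≤ cs.length := by
  induction cs with
  | nil => simp [removePuncScan]
  | cons a rest ih =>
    simp only [removePuncScan]
    split_ifs <;> simp [Nat.succ_le_succ ih]

-- No delimiter occurs strictly before the scan index.
lemma scan_not_before (cs : List Char) :
    ∀ j < removePuncScan cs, ∀ d ∈ removePuncDelims, ¬ d <+: cs.drop j := by
  induction cs with
  | nil => simp [removePuncScan]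
  | cons a rest ih =>
    intro j hj d hd
    simp only [removePuncScan] at hj
    split_ifs at hj with h1 h2
    · omega
    · omega
    · match j with
      | 0 =>
        simp only [List.drop_zero]
        simp only [removePuncDelims, List.mem_cons] at hd
        rcases hd with rfl|rfl|rfl|rfl|rfl|rfl|h
        · intro hp; apply h1; simp [List.cons_prefix_cons] at hp; simp [← hp]
        · intro hp; apply h1; simp [List.cons_prefix_cons] at hp; simp [← hp]
        · intro hp; apply h1; simp [List.cons_prefix_cons] at hp; simp [← hp]
        · intro hp; apply h1; simp [List.cons_prefix_cons] at hp; simp [← hp]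
        · intro hp; apply h1; simp [List.cons_prefix_cons] at hp; simp [← hp]
        · intro hp
          rcases hp with ⟨t, ht⟩
          cases rest with
          | nil => simp at ht
          | cons b r =>
            simp at ht
            simp [← ht.1, ← ht.2.1] at h2
        · simp at h
      | j' + 1 =>
        simp only [List.drop_succ_cons]
        exact ih j' (Nat.lt_of_succ_lt_succ hj) d hd

lemma scan_stop (cs : List Char) (h : removePuncScan cs < cs.length) :
    ∃ d ∈ removePuncDelims, d <+: cs.drop (removePuncScan cs) := by
  induction cs with
  | nil => simp [removePuncScan] at h
  | cons a rest ih =>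
    simp only [removePuncScan] at h ⊢
    split_ifs at h ⊢ with h1 h2
    · simp only [List.drop_zero]
      simp only [removePuncDelims]
      simp only [Bool.or_eq_true, beq_iff_eq] at h1
      rcases h1 with ((((rfl|rfl)|rfl)|rfl)|rfl) <;> simp
    · simp only [List.drop_zero, removePuncDelims]
      cases rest with
      | nil => simp at h2
      | cons b r =>
        simp only [Bool.and_eq_true, beq_iff_eq] at h2
        obtain ⟨rfl, rfl⟩ := h2
        refine ⟨['\'','s'], by simp, ⟨r, rfl⟩⟩
    · simp only [List.drop_succ_cons]
      exact ih (by simpa using h)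

lemma fold_min_spec (cs : List Char) (D : List (List Char)) (init : Int) :
    D.foldl (fun idx d =>
        let p := PySem.Chars.find cs d
        if p ≠ -1 ∧ p < idx then p else idx) init ≤ init ∧
      (D.foldl (fun idx d =>
        let p := PySem.Chars.find cs d
        if p ≠ -1 ∧ p < idx then p else idx) init = init ∨
        ∃ d ∈ D, D.foldl (fun idx d =>
          let p := PySem.Chars.find cs d
          if p ≠ -1 ∧ p < idx then p else idx) init = PySem.Chars.find cs d ∧
          PySem.Chars.find cs d ≠ -1) ∧
      ∀ d ∈ D, PySem.Chars.find cs d ≠ -1 →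
        D.foldl (fun idx d =>
          let p := PySem.Chars.find cs d
          if p ≠ -1 ∧ p < idx then p else idx) init ≤ PySem.Chars.find cs d := by
  induction D generalizing init with
  | nil => simp
  | cons d0 D ih =>
    simp only [List.foldl_cons]
    by_cases h : PySem.Chars.find cs d0 ≠ -1 ∧ PySem.Chars.find cs d0 < init
    · simp only [if_pos h]
      obtain ⟨hle, hor, hmin⟩ := ih (PySem.Chars.find cs d0)
      refine ⟨(hle.trans_lt h.2).le, ?_, ?_⟩
      · rcases hor with heq | ⟨d, hd, hh⟩
        · exact Or.inr ⟨d0, by simp, heq, h.1⟩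
        · exact Or.inr ⟨d, by simp [hd], hh⟩
      · intro d hd hf
        simp only [List.mem_cons] at hd
        rcases hd with rfl | hd
        · exact hle
        · exact hmin d hd hf
    · simp only [if_neg h]
      obtain ⟨hle, hor, hmin⟩ := ih init
      refine ⟨hle, ?_, ?_⟩
      · rcases hor with heq | ⟨d, hd, hh⟩
        · exact Or.inl heq
        · exact Or.inr ⟨d, by simp [hd], hh⟩
      · intro d hd hf
        simp only [List.mem_cons] at hd
        rcases hd with rfl | hd
        · have hnl : ¬ PySem.Chars.find cs d < init := fun hlt => h ⟨hf, hlt⟩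
          exact hle.trans (Int.not_lt.mp hnl)
        · exact hmin d hd hf

lemma scan_eq_fold (cs : List Char) :
    (removePuncScan cs : Int) = removePuncIdx cs := by
  obtain ⟨hle, hor, hmin⟩ := fold_min_spec cs removePuncDelims (cs.length : Int)
  set r := removePuncIdx cs with hr
  have hNle := scan_le cs
  have hr0 : 0 ≤ r := by
    rcases hor with heq | ⟨d, _, heq, hne⟩
    · rw [removePuncIdx] at hr; omega
    · have := PySem.Chars.neg_one_le_find cs d
      rw [removePuncIdx] at hr; rw [hr, heq]; omega
  -- r ≥ N
  have h1 : (removePuncScan cs : Int) ≤ r := by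
    by_contra hlt
    rw [Int.not_le] at hlt
    have hrlen : r.toNat < cs.length := by omega
    have hnb := scan_not_before cs r.toNat (by omega)
    rcases hor with heq | ⟨d, hd, heq, hne⟩
    · rw [removePuncIdx] at hr; omega
    · have hpos : 0 ≤ PySem.Chars.find cs d := by rw [removePuncIdx] at hr; omega
      have hspec := PySem.Chars.find_spec hpos
      apply hnb d hd
      have : (PySem.Chars.find cs d).toNat = r.toNat := by rw [removePuncIdx] at hr; omega
      rw [← this]
      exact hspec.1
  -- r ≤ N
  have h2 : r ≤ (removePuncScan cs : Int) := by
    rcases Nat.lt_or_ge (removePuncScan cs) cs.length with hN | hN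
    · obtain ⟨d, hd, hpre⟩ := scan_stop cs hN
      have hinf : d <:+: cs := hpre.isInfix.trans (cs.drop_suffix _).isInfix
      have hne : PySem.Chars.find cs d ≠ -1 := (PySem.Chars.find_ne_neg_one_iff cs d).2 hinf
      have hpos : 0 ≤ PySem.Chars.find cs d := by
        have := PySem.Chars.neg_one_le_find cs d; omega
      have hspec := PySem.Chars.find_spec hpos
      have hfN : (PySem.Chars.find cs d).toNat ≤ removePuncScan cs := by
        by_contra hgt
        exact hspec.2 (removePuncScan cs) (by omega) hpre
      have hmr : r ≤ PySem.Chars.find cs d := hmin d hd hne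
      omega
    · have : r ≤ (cs.length : Int) := by rw [removePuncIdx] at hr; omega
      omega
  omega

-- ===== VERDICT (by name: the statement is the Claim_ definition above) =====
theorem remove_punc_spec : Claim_equal_remove_punc := by
  intro word _
  unfold Spec_remove_punc remove_punc remove_punc_alt
  rw [← scan_eq_fold word.toList]
  simp [PySem.List.slice_zero_start]
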